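-- pv_equiv track=rewrite | github.com/vbellv/Algorithm | 프로그래머스/lv0/120956. 옹알이 （1）/옹알이 （1）.py | solution
-- ===== SOURCE A (Python) =====
-- from itertools import permutations
--
-- def solution(babbling):
--     baby = ["aya", "ye", "woo", "ma"]
--     word_list = []
--     cnt = 0
--
--     words = list(permutations(baby, 2)) + list(permutations(baby, 3)) + list(permutations(baby, 4))
--
--     for word in words:
--         word_list.append(''.join(word))
--     word_list += baby
--
--     for word in babbling:
--         if word in word_list:
--             cnt += 1
--
--     return cnt
-- ===== SOURCE B (Python) =====
-- def solution(babbling):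
--     sounds = ["aya", "ye", "woo", "ma"]
--
--     def ok(word):
--         rem = word
--         avail = list(sounds)
--         while rem:
--             for s in avail:
--                 if rem.startswith(s):
--                     rem = rem[len(s):]
--                     avail.remove(s)
--                     break
--             else:
--                 return False
--         return word != ""
--
--     return sum(ok(w) for w in babbling)
-- ===== Notes on version B (the rewrite author's own statement) =====
-- stated objective: simpler
-- what changed: A enumerates all concatenations of 2-, 3- and 4-permutations of the four sounds into a 64-entry list and tests each word by membership; B parses each word directly with a greedy front-consumption loop that matches one unused sound at a time (the four sounds start with distinct letters, so the parse is deterministic) and counts fully consumed nonempty words.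
import Mathlib
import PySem

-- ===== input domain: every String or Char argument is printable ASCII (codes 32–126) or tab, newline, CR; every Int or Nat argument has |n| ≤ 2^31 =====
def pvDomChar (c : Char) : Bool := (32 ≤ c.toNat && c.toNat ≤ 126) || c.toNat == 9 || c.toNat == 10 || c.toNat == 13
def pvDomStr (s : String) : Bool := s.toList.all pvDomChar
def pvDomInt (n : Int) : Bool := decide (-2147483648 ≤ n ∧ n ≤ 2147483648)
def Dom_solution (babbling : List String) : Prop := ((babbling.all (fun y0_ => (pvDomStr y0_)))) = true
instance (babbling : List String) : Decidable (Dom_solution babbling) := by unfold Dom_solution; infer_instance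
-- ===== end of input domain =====

-- B replaces A's enumerate-all-permutation-concatenations-then-membership with a direct greedy
-- one-pass parse of each word (consume a not-yet-used sound from the front); objective: simpler.

-- ===== PORT A =====
def babyA : List String := ["aya", "ye", "woo", "ma"]

def wordsA : List (List String) :=
  PySem.List.permutations babyA 2 ++ PySem.List.permutations babyA 3 ++ PySem.List.permutations babyA 4

def wordListA : List String :=
  (wordsA.foldl (fun acc word => acc ++ [PySem.Str.join "" word]) []) ++ babyA

def solution (babbling : List String) : Int :=
  babbling.foldl (fun cnt word => if word ∈ wordListA then cnt + 1 else cnt) 0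

-- ===== PORT B =====
def altSoundsC : List (List Char) := [['a','y','a'], ['y','e'], ['w','o','o'], ['m','a']]

-- the 'while rem:' loop of Source B's ok(): find an unused sound that is a prefix, consume it
def altGo (fuel : Nat) (rem : List Char) (avail : List (List Char)) : Bool :=
  match fuel, rem with
  | _, [] => true
  | 0, _ :: _ => false
  | f + 1, c :: cs =>
    match avail.find? (fun s => PySem.Chars.startswith (c :: cs) s) with
    | none => false
    | some s => altGo f ((c :: cs).drop s.length) (avail.erase s)

def altOk (word : String) : Bool :=
  altGo word.toList.length word.toList altSoundsC && !word.toList.isEmpty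

def solution_alt (babbling : List String) : Int :=
  (babbling.map (fun w => if altOk w then (1 : Int) else 0)).sum

-- ===== PRECONDITION & SPEC =====
def Spec_solution (babbling : List String) (out : Int) : Prop := out = solution_alt babbling
instance (babbling : List String) (out : Int) : Decidable (Spec_solution babbling out) := by unfold Spec_solution; infer_instance

-- ===== CLAIM (what is proved, stated in full; the proofs are below) =====
def Claim_equal_solution : Prop := ∀ (babbling : List String), Dom_solution babbling → Spec_solution babbling (solution babbling)

-- ===== LEMMAS AND PROOFS =====

lemma intercalate_nil_eq_flatten (parts : List (List Char)) :
    List.intercalate [] parts = parts.flatten := by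
  induction parts with
  | nil => rfl
  | cons a t ih =>
    cases t with
    | nil => simp [List.intercalate]
    | cons b t' =>
      simp only [List.intercalate, List.intersperse] at ih ⊢
      simp_all

lemma strJoin_empty_toList (seq : List String) :
    (PySem.Str.join "" seq).toList = (seq.map String.toList).flatten := by
  rw [PySem.Str.toList_join]
  show PySem.Chars.join [] _ = _
  exact intercalate_nil_eq_flatten _

lemma strJoin_singleton (s : String) : PySem.Str.join "" [s] = s := by
  rw [← String.toList_inj, strJoin_empty_toList]; simp

-- membership in PySem.List.permutations over a duplicate-free list, both directions
lemma mem_permutations_of {α : Type} [BEq α] [LawfulBEq α] (r : Nat) (xs p : List α)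
    (hlen : p.length = r) (hnd : p.Nodup) (hsub : ∀ x ∈ p, x ∈ xs) :
    p ∈ PySem.List.permutations xs r := by
  induction r generalizing xs p with
  | zero =>
    rw [List.length_eq_zero_iff] at hlen
    subst hlen
    simp [PySem.List.permutations_zero]
  | succ r ih =>
    cases p with
    | nil => simp at hlen
    | cons x t =>
      have hx : x ∈ xs := hsub x List.mem_cons_self
      have hi : xs.idxOf x < xs.length := List.idxOf_lt_length_of_mem hx
      rw [PySem.List.permutations_succ]
      apply List.mem_flatMap.mpr
      refine ⟨xs.idxOf x, List.mem_range.mpr hi, ?_⟩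
      have hget : xs[xs.idxOf x]? = some x := by
        rw [List.getElem?_eq_getElem hi, List.getElem_idxOf]
      rw [hget]
      apply List.mem_map.mpr
      refine ⟨t, ?_, rfl⟩
      rw [← List.erase_eq_eraseIdx_of_idxOf rfl]
      have hxt : x ∉ t := (List.nodup_cons.mp hnd).1
      exact ih (xs.erase x) t (by simpa using hlen) (List.nodup_cons.mp hnd).2
        (fun y hy => (List.mem_erase_of_ne (fun he => hxt (by rw [← he]; exact hy))).mpr
          (hsub y (List.mem_cons_of_mem _ hy)))

lemma of_mem_permutations {α : Type} (r : Nat) (xs p : List α) (hnd : xs.Nodup)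
    (h : p ∈ PySem.List.permutations xs r) :
    p.length = r ∧ p.Nodup ∧ ∀ x ∈ p, x ∈ xs := by
  obtain ⟨hlen, rest, hperm⟩ := PySem.List.exists_perm_of_mem_permutations r xs p h
  refine ⟨hlen, ?_, fun y hy => PySem.List.mem_of_mem_of_mem_permutations h hy⟩
  exact ((hperm.nodup_iff).mpr hnd).of_append_left

lemma find?_eq_some_of_unique {α : Type} (p : α → Bool) (l : List α) (s : α)
    (hmem : s ∈ l) (hp : p s = true) (huniq : ∀ t ∈ l, p t = true → t = s) :
    l.find? p = some s := by
  induction l with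
  | nil => cases hmem
  | cons a l ih =>
    by_cases ha : p a = true
    · have := huniq a List.mem_cons_self ha
      subst this
      simp [List.find?_cons_of_pos, ha]
    · rw [List.find?_cons_of_neg (by simpa using ha)]
      have hsl : s ∈ l := by
        rcases List.mem_cons.mp hmem with rfl | h
        · exact absurd hp ha
        · exact h
      exact ih hsl (fun t ht hpt => huniq t (List.mem_cons_of_mem _ ht) hpt)

-- the four sounds have pairwise distinct first letters: the only sound that is a prefix
-- of s ++ tail (s a sound) is s itself
lemma sound_prefix_eq {s t : List Char} (tail : List Char)
    (hs : s ∈ altSoundsC) (ht : t ∈ altSoundsC) (hp : t <+: s ++ tail) : t = s := by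
  obtain ⟨u, hu⟩ := hp
  fin_cases hs <;> fin_cases ht <;> first | rfl | simp_all

lemma altGo_nil (fuel : Nat) (avail : List (List Char)) : altGo fuel [] avail = true := by
  cases fuel <;> rfl

lemma altGo_complete (seq : List (List Char)) (avail : List (List Char)) (fuel : Nat)
    (hnd : seq.Nodup) (hsub : ∀ x ∈ seq, x ∈ avail) (hav : ∀ x ∈ avail, x ∈ altSoundsC)
    (hf : seq.flatten.length ≤ fuel) : altGo fuel seq.flatten avail = true := by
  induction seq generalizing avail fuel with
  | nil => exact altGo_nil _ _
  | cons s rest ih =>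
    have hsav : s ∈ avail := hsub s List.mem_cons_self
    have hss : s ∈ altSoundsC := hav s hsav
    obtain ⟨c, s', rfl⟩ : ∃ c s', s = c :: s' := by
      fin_cases hss <;> exact ⟨_, _, rfl⟩
    rw [List.flatten_cons] at hf ⊢
    cases fuel with
    | zero => simp at hf
    | succ f =>
      have hfind : avail.find? (fun t => PySem.Chars.startswith (c :: (s' ++ rest.flatten)) t)
          = some (c :: s') := by
        apply find?_eq_some_of_unique _ _ _ hsav
        · exact (PySem.Chars.startswith_iff _ _).mpr (by simp)
        · intro t htav hpt
          exact sound_prefix_eq rest.flatten hss (hav t htav)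
            (by have := (PySem.Chars.startswith_iff _ _).mp hpt; simpa using this)
      show altGo (f + 1) (c :: (s' ++ rest.flatten)) avail = true
      rw [altGo, hfind]
      show altGo f ((c :: (s' ++ rest.flatten)).drop (c :: s').length) (avail.erase (c :: s')) = true
      have hdrop : (c :: (s' ++ rest.flatten)).drop (c :: s').length = rest.flatten := by
        simp
      rw [hdrop]
      have hxt : (c :: s') ∉ rest := (List.nodup_cons.mp hnd).1
      exact ih (avail.erase (c :: s')) f (List.nodup_cons.mp hnd).2
        (fun y hy => (List.mem_erase_of_ne (fun he => hxt (by rw [← he]; exact hy))).mpr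
          (hsub y (List.mem_cons_of_mem _ hy)))
        (fun y hy => hav y (List.erase_subset hy))
        (by simp at hf ⊢; omega)

lemma altGo_sound (fuel : Nat) (rem : List Char) (avail : List (List Char))
    (hnd : avail.Nodup) (h : altGo fuel rem avail = true) :
    ∃ seq : List (List Char), seq.Nodup ∧ (∀ x ∈ seq, x ∈ avail) ∧ rem = seq.flatten := by
  induction fuel generalizing rem avail with
  | zero =>
    cases rem with
    | nil => exact ⟨[], by simp⟩
    | cons c cs => exact absurd h (by rw [altGo]; simp)
  | succ f ih =>
    cases rem with
    | nil => exact ⟨[], by simp⟩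
    | cons c cs =>
      rw [altGo] at h
      cases hfind : avail.find? (fun s => PySem.Chars.startswith (c :: cs) s) with
      | none => rw [hfind] at h; exact absurd h (by simp)
      | some s =>
        rw [hfind] at h
        have hsav : s ∈ avail := List.mem_of_find?_eq_some hfind
        have hpre : s <+: c :: cs := (PySem.Chars.startswith_iff _ _).mp (List.find?_some hfind)
        have heq : s ++ (c :: cs).drop s.length = c :: cs := List.prefix_iff_eq_append.mp hpre
        obtain ⟨seq', hnd', hsub', hflat'⟩ := ih _ _ (hnd.erase s) h
        refine ⟨s :: seq', ?_, ?_, ?_⟩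
        · exact List.nodup_cons.mpr ⟨fun hc => hnd.not_mem_erase (hsub' s hc), hnd'⟩
        · intro y hy
          rcases List.mem_cons.mp hy with rfl | hy'
          · exact hsav
          · exact List.erase_subset (hsub' y hy')
        · rw [List.flatten_cons, ← hflat', heq]

lemma mem_wordListA_iff (w : String) :
    w ∈ wordListA ↔ ∃ seq : List String, seq.Nodup ∧ (∀ x ∈ seq, x ∈ babyA) ∧ seq ≠ [] ∧
      w = PySem.Str.join "" seq := by
  have hbn : babyA.Nodup := by decide
  rw [wordListA, PySem.List.foldl_append_singleton_eq_map]
  constructor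
  · intro h
    rcases List.mem_append.mp h with h | h
    · simp only [List.nil_append] at h
      obtain ⟨seq, hseq, rfl⟩ := List.mem_map.mp h
      have hr : seq ∈ PySem.List.permutations babyA 2 ∨ seq ∈ PySem.List.permutations babyA 3 ∨
          seq ∈ PySem.List.permutations babyA 4 := by
        simpa [wordsA, List.mem_append, or_assoc] using hseq
      rcases hr with h' | h' | h' <;>
      · obtain ⟨hlen, hnd, hsub⟩ := of_mem_permutations _ _ _ hbn h'
        exact ⟨seq, hnd, hsub, by intro he; rw [he] at hlen; simp at hlen, rfl⟩
    · exact ⟨[w], by simp, by simpa using h, by simp, (strJoin_singleton w).symm⟩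
  · rintro ⟨seq, hnd, hsub, hne, rfl⟩
    have hle : seq.length ≤ 4 := by
      have := (List.subperm_of_subset hnd hsub).length_le
      simpa [babyA] using this
    have hge : 1 ≤ seq.length := by
      cases seq with
      | nil => exact absurd rfl hne
      | cons a t => simp
    by_cases h1 : seq.length = 1
    · obtain ⟨a, rfl⟩ := List.length_eq_one_iff.mp h1
      rw [strJoin_singleton]
      exact List.mem_append.mpr (Or.inr (hsub a List.mem_cons_self))
    · have hm : seq ∈ wordsA := by
        have hmem : seq ∈ PySem.List.permutations babyA seq.length :=
          mem_permutations_of _ _ _ rfl hnd hsub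
        rcases (by omega : seq.length = 2 ∨ seq.length = 3 ∨ seq.length = 4) with h | h | h <;>
          rw [h] at hmem <;> simp [wordsA, List.mem_append, hmem]
      exact List.mem_append.mpr (Or.inl (by simpa using List.mem_map.mpr ⟨seq, hm, rfl⟩))

lemma mem_altSoundsC_ne_nil {y : List Char} (hy : y ∈ altSoundsC) : y ≠ [] := by
  fin_cases hy <;> simp

lemma toList_mem_altSoundsC {x : String} (hx : x ∈ babyA) : x.toList ∈ altSoundsC := by
  fin_cases hx <;> decide

lemma ofList_mem_babyA {y : List Char} (hy : y ∈ altSoundsC) : String.ofList y ∈ babyA := by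
  fin_cases hy <;> decide

lemma mem_wordListA_iff_altOk (w : String) : w ∈ wordListA ↔ altOk w = true := by
  rw [mem_wordListA_iff]
  constructor
  · rintro ⟨seq, hnd, hsub, hne, rfl⟩
    have hflat : (PySem.Str.join "" seq).toList = (seq.map String.toList).flatten :=
      strJoin_empty_toList seq
    have hgo : altGo (PySem.Str.join "" seq).toList.length (PySem.Str.join "" seq).toList altSoundsC = true := by
      rw [hflat]
      exact altGo_complete _ _ _
        (hnd.map (fun a b hab => String.toList_inj.mp hab))
        (by rintro x hx; obtain ⟨y, hy, rfl⟩ := List.mem_map.mp hx; exact toList_mem_altSoundsC (hsub y hy))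
        (fun x hx => hx) le_rfl
    have hnonempty : (PySem.Str.join "" seq).toList ≠ [] := by
      cases seq with
      | nil => exact absurd rfl hne
      | cons a t =>
        rw [hflat]
        have hane : a.toList ≠ [] :=
          mem_altSoundsC_ne_nil (toList_mem_altSoundsC (hsub a List.mem_cons_self))
        simp only [List.map_cons, List.flatten_cons]
        intro hc
        exact hane (List.append_eq_nil_iff.mp hc).1
    rw [altOk, hgo]
    simpa using hnonempty
  · intro h
    rw [altOk, Bool.and_eq_true] at h
    have hne : w.toList ≠ [] := by simpa using h.2
    obtain ⟨seqC, hndC, hsubC, hflat⟩ :=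
      altGo_sound _ _ _ (by decide : altSoundsC.Nodup) h.1
    refine ⟨seqC.map String.ofList, ?_, ?_, ?_, ?_⟩
    · apply List.Nodup.of_map String.toList
      have : (seqC.map String.ofList).map String.toList = seqC := by
        simp [List.map_map, Function.comp_def]
      rw [this]; exact hndC
    · rintro x hx
      obtain ⟨y, hy, rfl⟩ := List.mem_map.mp hx
      exact ofList_mem_babyA (hsubC y hy)
    · intro hc
      rcases seqC with _ | _
      · exact hne (by simpa using hflat)
      · simp at hc
    · rw [← String.toList_inj, strJoin_empty_toList, hflat]
      congr 1
      simp [List.map_map, Function.comp_def]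

-- ===== VERDICT (by name: the statement is the Claim_ definition above) =====
theorem solution_spec : Claim_equal_solution := by
  intro babbling _
  unfold Spec_solution solution solution_alt
  rw [PySem.List.foldl_ite_add_one (p := fun w => w ∈ wordListA),
      PySem.List.sum_map_ite_one_zero (p := altOk)]
  have : babbling.countP (fun w => decide (w ∈ wordListA)) = babbling.countP altOk := by
    apply List.countP_congr
    intro w _
    cases haltOk : altOk w <;> simp [mem_wordListA_iff_altOk, haltOk]
  rw [this]
  ring
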